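-- pv_equiv track=rewrite | github.com/cheesyGarlicBread15/CISC-Days-2025-Programming-Race | python/problem1.py | lucky_guess
-- ===== SOURCE A (Python) =====
-- def lucky_guess(guesses: list[int], number: int) -> str:
--     # Implement your code below
--     attempts = 0
--     for guess in guesses:
--         if guess < 1 or guess > 10:
--             continue
--         attempts += 1
--         if guess == number:
--             return "You win!"
--         if attempts == 3:
--             break
--     return f"You lose! The number was {number}"
-- ===== SOURCE B (Python) =====
-- def lucky_guess(guesses: list[int], number: int) -> str:
--     # Win iff the number is in range, appears in the guesses, and fewer than
--     # three in-range guesses come before its first occurrence.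
--     if 1 <= number <= 10 and number in guesses:
--         i = guesses.index(number)
--         if sum(1 for g in guesses[:i] if 1 <= g <= 10) < 3:
--             return "You win!"
--     return f"You lose! The number was {number}"
-- ===== Notes on version B (the rewrite author's own statement) =====
-- stated objective: alternative
-- what changed: Replaced the attempt-counter early-exit scan with a positional characterization: locate the first occurrence of the number via list.index and win iff it is in range and fewer than three in-range guesses precede that position.
import Mathlib
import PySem

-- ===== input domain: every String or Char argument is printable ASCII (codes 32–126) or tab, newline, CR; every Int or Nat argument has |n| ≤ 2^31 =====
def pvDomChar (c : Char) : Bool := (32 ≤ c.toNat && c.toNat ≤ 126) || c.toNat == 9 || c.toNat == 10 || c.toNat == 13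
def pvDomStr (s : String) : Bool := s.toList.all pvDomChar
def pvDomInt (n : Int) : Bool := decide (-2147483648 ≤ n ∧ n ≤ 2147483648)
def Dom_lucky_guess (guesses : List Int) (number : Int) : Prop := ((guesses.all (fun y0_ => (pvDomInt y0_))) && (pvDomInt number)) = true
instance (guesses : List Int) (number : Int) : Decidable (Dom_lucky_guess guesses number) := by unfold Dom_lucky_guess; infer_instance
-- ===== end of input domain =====

-- B replaces A's attempt-counter early-exit scan with a positional characterization: win iff the number is in range, occurs in the list, and fewer than three in-range guesses precede its first occurrence (alternative decomposition, same cost).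


-- ===== PORT A =====
-- attempts-counter loop of A, transliterated
def luckyLoop (guesses : List Int) (attempts : Nat) (number : Int) : String :=
  match guesses with
  | [] => "You lose! The number was " ++ PySem.Int.toStr number
  | g :: rest =>
    if g < 1 ∨ g > 10 then luckyLoop rest attempts number
    else if g = number then "You win!"
    else if attempts + 1 = 3 then "You lose! The number was " ++ PySem.Int.toStr number
    else luckyLoop rest (attempts + 1) number

def lucky_guess (guesses : List Int) (number : Int) : String :=
  luckyLoop guesses 0 number

-- ===== PORT B =====
-- Source B: range check + membership, then list.index and a count over the prefix guesses[:i]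
def lucky_guess_alt (guesses : List Int) (number : Int) : String :=
  if (1 ≤ number ∧ number ≤ 10) ∧ number ∈ guesses then
    match PySem.List.index? guesses number with
    | some i =>
      if (guesses.take i).countP (fun g => decide (1 ≤ g ∧ g ≤ 10)) < 3
      then "You win!"
      else "You lose! The number was " ++ PySem.Int.toStr number
    | none => "You lose! The number was " ++ PySem.Int.toStr number
  else "You lose! The number was " ++ PySem.Int.toStr number

-- ===== PRECONDITION & SPEC =====
def Spec_lucky_guess (guesses : List Int) (number : Int) (out : String) : Prop := out = lucky_guess_alt guesses number
instance (guesses : List Int) (number : Int) (out : String) : Decidable (Spec_lucky_guess guesses number out) := by unfold Spec_lucky_guess; infer_instance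

-- ===== CLAIM (what is proved, stated in full; the proofs are below) =====
def Claim_equal_lucky_guess : Prop := ∀ (guesses : List Int) (number : Int), Dom_lucky_guess guesses number → Spec_lucky_guess guesses number (lucky_guess guesses number)

-- ===== LEMMAS AND PROOFS =====

-- "win with budget k": number in range, first occurrence at i, fewer than k valid guesses before i
def okB (gs : List Int) (k : Nat) (n : Int) : Bool :=
  decide (1 ≤ n ∧ n ≤ 10) &&
    (match PySem.List.index? gs n with
     | some i => decide ((gs.take i).countP (fun g => decide (1 ≤ g ∧ g ≤ 10)) < k)
     | none => false)

theorem luckyLoop_eq (number : Int) :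
    ∀ (gs : List Int) (a : Nat), a < 3 →
    luckyLoop gs a number =
      if okB gs (3 - a) number then "You win!"
      else "You lose! The number was " ++ PySem.Int.toStr number := by
  intro gs
  induction gs with
  | nil =>
    intro a _
    simp [luckyLoop, okB, PySem.List.index?_eq_idxOf?]
  | cons g rest ih =>
    intro a ha
    by_cases hr : g < 1 ∨ g > 10
    · -- invalid guess: skipped by A, contributes nothing to B's count
      rw [luckyLoop, if_pos hr, ih a ha]
      by_cases hg : g = number
      · subst hg
        have hn : decide (1 ≤ g ∧ g ≤ 10) = false := by
          simp only [decide_eq_false_iff_not]; omega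
        simp [okB, hn]
      · have hidx := PySem.List.index?_cons_of_ne (xs := rest) (v := number) hg
        have hc : (fun x => decide (1 ≤ x ∧ x ≤ 10)) g = false := by
          simp only [decide_eq_false_iff_not]; omega
        unfold okB
        rw [hidx]
        cases hrest : PySem.List.index? rest number with
        | none => simp
        | some i =>
          have hg10 : ¬(1 ≤ g ∧ g ≤ 10) := by omega
          simp [List.countP_cons, hg10]
    · push_neg at hr
      by_cases hg : g = number
      · -- valid and equal: A wins; B: index 0, empty prefix
        subst hg
        rw [luckyLoop, if_neg (by omega), if_pos rfl]
        have hn : decide (1 ≤ g ∧ g ≤ 10) = true := by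
          simp only [decide_eq_true_eq]; omega
        unfold okB
        rw [PySem.List.index?_cons_self]
        simp only [List.take_zero, List.countP_nil, hn]
        have : 0 < 3 - a := by omega
        simp [this]
      · have hidx := PySem.List.index?_cons_of_ne (xs := rest) (v := number) hg
        have hc : (fun x => decide (1 ≤ x ∧ x ≤ 10)) g = true := by
          simp only [decide_eq_true_eq]; omega
        by_cases h3 : a + 1 = 3
        · -- third valid attempt, wrong: A loses; any occurrence has ≥1 valid before it
          rw [luckyLoop, if_neg (by omega), if_neg hg, if_pos h3]
          have hk : 3 - a = 1 := by omega
          unfold okB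
          rw [hidx, hk]
          cases hrest : PySem.List.index? rest number with
          | none => simp
          | some i =>
            have hg10 : (1 ≤ g ∧ g ≤ 10) := hr
            simp only [Option.map_some, List.take_succ_cons, List.countP_cons, hc,
              if_true, Nat.lt_one_iff]
            simp [hg10]
        · rw [luckyLoop, if_neg (by omega), if_neg hg, if_neg h3,
              ih (a + 1) (by omega)]
          have heq : okB (g :: rest) (3 - a) number = okB rest (3 - (a + 1)) number := by
            unfold okB
            rw [hidx]
            cases hrest : PySem.List.index? rest number with
            | none => simp
            | some i =>
              simp only [Option.map_some, List.take_succ_cons, List.countP_cons, hc, if_true]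
              congr 1
              rw [decide_eq_decide]
              omega
          rw [heq]

theorem alt_eq_okB (gs : List Int) (n : Int) :
    lucky_guess_alt gs n =
      if okB gs 3 n then "You win!"
      else "You lose! The number was " ++ PySem.Int.toStr n := by
  unfold lucky_guess_alt okB
  by_cases hn : 1 ≤ n ∧ n ≤ 10
  · cases hidx : PySem.List.index? gs n with
    | none =>
      have : n ∉ gs := by
        rw [← PySem.List.index?_eq_none_iff (xs := gs) (v := n)]; exact hidx
      simp [hn, this, hidx]
    | some i =>
      have hmem : n ∈ gs := by
        have := PySem.List.index?_isSome_iff (xs := gs) (v := n)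
        rw [hidx] at this; simpa using this
      rw [if_pos ⟨hn, hmem⟩]
      have hb : (decide (1 ≤ n ∧ n ≤ 10)) = true := by simp [hn]
      rw [hb, Bool.true_and]
      simp only [decide_eq_true_eq]
  · simp [hn]

-- ===== VERDICT (by name: the statement is the Claim_ definition above) =====
theorem lucky_guess_spec : Claim_equal_lucky_guess := by
  intro guesses number _
  unfold Spec_lucky_guess lucky_guess
  rw [alt_eq_okB, luckyLoop_eq number guesses 0 (by omega)]
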